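-- pv_equiv track=rewrite | github.com/flavionogueiraa/sistemas_inteligentes | unidade2/rainhas/rainhas.py | f
-- ===== SOURCE A (Python) =====
-- def ameaca(i, j, rainhas):
--     col_i = rainhas[i]
--     col_j = rainhas[j]
--
--     if col_i == col_j:
--         return True
--
--     diag_desc_i = i + col_i
--     diag_desc_j = j + col_j
--
--     if diag_desc_i == diag_desc_j:
--         return True
--
--     diag_asc_i = i - col_i
--     diag_asc_j = j - col_j
--
--     if diag_asc_i == diag_asc_j:
--         return True
--
--     return False
--
-- def f(rainhas):
--     cont = 0
--     for i in range(len(rainhas)):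
--         ameacada = False
--         for j in range(len(rainhas)):
--             if i == j:
--                 continue
--
--             if ameaca(i, j, rainhas):
--                 ameacada = True
--                 break
--
--         if not ameacada:
--             cont += 1
--     return cont
-- ===== SOURCE B (Python) =====
-- def f(rainhas):
--     n = len(rainhas)
--     col_count = {}
--     desc_count = {}
--     asc_count = {}
--     for i in range(n):
--         c = rainhas[i]
--         col_count[c] = col_count.get(c, 0) + 1
--         desc_count[i + c] = desc_count.get(i + c, 0) + 1
--         asc_count[i - c] = asc_count.get(i - c, 0) + 1
--     cont = 0
--     for i in range(n):
--         c = rainhas[i]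
--         if col_count[c] == 1 and desc_count[i + c] == 1 and asc_count[i - c] == 1:
--             cont += 1
--     return cont
-- ===== Notes on version B (the rewrite author's own statement) =====
-- stated objective: faster
-- what changed: Replaced the nested pairwise threat scan (with the ameaca helper) by one pass that builds column/diagonal/anti-diagonal count tables and a second pass that counts queens whose three keys each occur exactly once.
import Mathlib
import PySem

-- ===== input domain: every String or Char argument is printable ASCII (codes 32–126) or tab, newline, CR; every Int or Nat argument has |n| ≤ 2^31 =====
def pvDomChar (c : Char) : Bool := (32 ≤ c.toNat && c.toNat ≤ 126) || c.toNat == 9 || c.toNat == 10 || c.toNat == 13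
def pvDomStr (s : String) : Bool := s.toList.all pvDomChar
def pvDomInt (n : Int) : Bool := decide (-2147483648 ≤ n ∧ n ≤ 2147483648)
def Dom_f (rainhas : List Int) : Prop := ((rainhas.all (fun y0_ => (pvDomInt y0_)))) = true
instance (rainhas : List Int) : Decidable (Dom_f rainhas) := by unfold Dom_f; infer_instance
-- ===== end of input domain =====

-- B replaces A's O(n^2) pairwise threat scan by O(n) count tables for columns and both diagonals.

-- ===== PORT A =====
def ameacaF (i j : Int) (rainhas : List Int) : Bool :=
  let col_i := PySem.List.pyGetD rainhas i 0
  let col_j := PySem.List.pyGetD rainhas j 0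
  if col_i == col_j then true
  else
    let diag_desc_i := i + col_i
    let diag_desc_j := j + col_j
    if diag_desc_i == diag_desc_j then true
    else
      let diag_asc_i := i - col_i
      let diag_asc_j := j - col_j
      if diag_asc_i == diag_asc_j then true
      else false

-- A's inner 'for j' loop with its break: returns the final value of 'ameacada'
def fInner (i : Int) (rainhas : List Int) : List Int → Bool
  | [] => false
  | j :: rest =>
    if i == j then fInner i rainhas rest
    else if ameacaF i j rainhas then true
    else fInner i rainhas rest

def f (rainhas : List Int) : Int :=
  (PySem.List.pyRange 0 (rainhas.length : Int) 1).foldl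
    (fun cont i =>
      if !(fInner i rainhas (PySem.List.pyRange 0 (rainhas.length : Int) 1)) then cont + 1
      else cont) 0

-- ===== PORT B =====
def f_alt (rainhas : List Int) : Int :=
  let n : Int := rainhas.length
  let tabs :=
    (PySem.List.pyRange 0 n 1).foldl
      (fun (t : PySem.Dict Int Int × PySem.Dict Int Int × PySem.Dict Int Int) i =>
        let c := PySem.List.pyGetD rainhas i 0
        (t.1.modify c 0 (· + 1), t.2.1.modify (i + c) 0 (· + 1), t.2.2.modify (i - c) 0 (· + 1)))
      (PySem.Dict.empty, PySem.Dict.empty, PySem.Dict.empty)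
  (PySem.List.pyRange 0 n 1).foldl
    (fun cont i =>
      let c := PySem.List.pyGetD rainhas i 0
      if tabs.1.getD c 0 == 1 && (tabs.2.1.getD (i + c) 0 == 1 && tabs.2.2.getD (i - c) 0 == 1)
      then cont + 1 else cont) 0

-- ===== PRECONDITION & SPEC =====
def Spec_f (rainhas : List Int) (out : Int) : Prop := out = f_alt rainhas
instance (rainhas : List Int) (out : Int) : Decidable (Spec_f rainhas out) := by unfold Spec_f; infer_instance

-- ===== CLAIM (what is proved, stated in full; the proofs are below) =====
def Claim_equal_f : Prop := ∀ (rainhas : List Int), Dom_f rainhas → Spec_f rainhas (f rainhas)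

-- ===== LEMMAS AND PROOFS =====

-- A fold that updates three independent components is the triple of the three folds
theorem foldl_prod3 {α β γ δ : Type} (g1 : α → δ → α) (g2 : β → δ → β) (g3 : γ → δ → γ)
    (L : List δ) (a : α) (b : β) (c : γ) :
    L.foldl (fun t x => (g1 t.1 x, g2 t.2.1 x, g3 t.2.2 x)) (a, b, c)
      = (L.foldl g1 a, L.foldl g2 b, L.foldl g3 c) := by
  induction L generalizing a b c with
  | nil => rfl
  | cons x xs ih => simp [List.foldl, ih]

-- the inner loop finds a threatening j iff one exists in the scanned list
theorem fInner_eq_true_iff (i : Int) (rainhas : List Int) (js : List Int) :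
    fInner i rainhas js = true ↔ ∃ j ∈ js, j ≠ i ∧ ameacaF i j rainhas = true := by
  induction js with
  | nil => simp [fInner]
  | cons j rest ih =>
    simp only [fInner, List.mem_cons]
    by_cases h : i = j
    · subst h
      simp only [BEq.rfl, if_true, ih]
      constructor
      · rintro ⟨x, hx, hne, hax⟩; exact ⟨x, Or.inr hx, hne, hax⟩
      · rintro ⟨x, hx, hne, hax⟩
        rcases hx with rfl | hm
        · exact absurd rfl hne
        · exact ⟨x, hm, hne, hax⟩
    · have hb : (i == j) = false := by simp [h]
      rw [hb]
      simp only [Bool.false_eq_true, if_false]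
      by_cases ha : ameacaF i j rainhas = true
      · simp only [ha, if_true, true_iff]
        exact ⟨j, Or.inl rfl, fun he => h he.symm, ha⟩
      · have hb2 : ameacaF i j rainhas = false := by simpa using ha
        rw [hb2]
        simp only [Bool.false_eq_true, if_false, ih]
        constructor
        · rintro ⟨x, hx, hne, hax⟩; exact ⟨x, Or.inr hx, hne, hax⟩
        · rintro ⟨x, hx, hne, hax⟩
          rcases hx with rfl | hm
          · exact absurd hax ha
          · exact ⟨x, hm, hne, hax⟩

-- key-occurs-once characterisation: g i occurs once among the keys of L iff no other j shares it
theorem count_map_eq_one_iff (g : Int → Int) (L : List Int) (hnd : L.Nodup) (i : Int)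
    (hi : i ∈ L) :
    (L.map g).count (g i) = 1 ↔ ∀ j ∈ L, j ≠ i → g j ≠ g i := by
  have hc : (L.map g).count (g i) = (L.filter (fun j => g j == g i)).length := by
    rw [List.count_eq_countP, List.countP_map, List.countP_eq_length_filter]
    rfl
  rw [hc]
  have hiF : i ∈ L.filter (fun j => g j == g i) := by
    simp [List.mem_filter, hi]
  constructor
  · intro h1 j hj hne hgj
    have hjF : j ∈ L.filter (fun j => g j == g i) := by simp [List.mem_filter, hj, hgj]
    obtain ⟨a, ha⟩ := List.length_eq_one_iff.mp h1
    rw [ha] at hiF hjF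
    simp at hiF hjF
    exact hne (hjF.trans hiF.symm)
  · intro hall
    have hsub : ∀ x ∈ L.filter (fun j => g j == g i), x = i := by
      intro x hx
      rw [List.mem_filter] at hx
      by_contra hne
      exact hall x hx.1 hne (by simpa using hx.2)
    have hndF : (L.filter (fun j => g j == g i)).Nodup := hnd.filter _
    cases hF : L.filter (fun j => g j == g i) with
    | nil => rw [hF] at hiF; simp at hiF
    | cons a t =>
      cases t with
      | nil => simp
      | cons b t2 =>
        exfalso
        have ha : a = i := hsub a (by rw [hF]; simp)
        have hb : b = i := hsub b (by rw [hF]; simp)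
        rw [hF] at hndF
        simp [ha, hb] at hndF

-- ===== VERDICT =====
theorem f_spec : Claim_equal_f := by
  intro rainhas _
  show f rainhas = f_alt rainhas
  have hnd : (PySem.List.pyRange 0 (rainhas.length : Int) 1).Nodup :=
    PySem.List.nodup_pyRange_one 0 (rainhas.length : Int)
  -- B's table build splits into three independent folds
  have htabs :
      (PySem.List.pyRange 0 (rainhas.length : Int) 1).foldl
        (fun (t : PySem.Dict Int Int × PySem.Dict Int Int × PySem.Dict Int Int) i =>
          (t.1.modify (PySem.List.pyGetD rainhas i 0) 0 (· + 1),
           t.2.1.modify (i + PySem.List.pyGetD rainhas i 0) 0 (· + 1),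
           t.2.2.modify (i - PySem.List.pyGetD rainhas i 0) 0 (· + 1)))
        (PySem.Dict.empty, PySem.Dict.empty, PySem.Dict.empty)
      = ((PySem.List.pyRange 0 (rainhas.length : Int) 1).foldl
           (fun d i => d.modify (PySem.List.pyGetD rainhas i 0) 0 (· + 1)) PySem.Dict.empty,
         (PySem.List.pyRange 0 (rainhas.length : Int) 1).foldl
           (fun d i => d.modify (i + PySem.List.pyGetD rainhas i 0) 0 (· + 1)) PySem.Dict.empty,
         (PySem.List.pyRange 0 (rainhas.length : Int) 1).foldl
           (fun d i => d.modify (i - PySem.List.pyGetD rainhas i 0) 0 (· + 1)) PySem.Dict.empty) :=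
    foldl_prod3 (fun d i => PySem.Dict.modify d (PySem.List.pyGetD rainhas i 0) 0 (· + 1))
      (fun d i => PySem.Dict.modify d (i + PySem.List.pyGetD rainhas i 0) 0 (· + 1))
      (fun d i => PySem.Dict.modify d (i - PySem.List.pyGetD rainhas i 0) 0 (· + 1)) _ _ _ _
  -- getD of each single-key count table is the count of the key among the mapped keys
  have hget : ∀ (key : Int → Int) (v : Int),
      ((PySem.List.pyRange 0 (rainhas.length : Int) 1).foldl
          (fun d i => d.modify (key i) 0 (· + 1)) PySem.Dict.empty).getD v 0
        = ((((PySem.List.pyRange 0 (rainhas.length : Int) 1).map key).count v : Nat) : Int) := by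
    intro key v
    have hmap : (PySem.List.pyRange 0 (rainhas.length : Int) 1).foldl
          (fun d i => PySem.Dict.modify d (key i) 0 (· + 1))
          (PySem.Dict.empty : PySem.Dict Int Int)
        = ((PySem.List.pyRange 0 (rainhas.length : Int) 1).map key).foldl
          (fun d k => PySem.Dict.modify d k 0 (· + 1))
          (PySem.Dict.empty : PySem.Dict Int Int) := by
      rw [List.foldl_map]
    rw [hmap]
    simp [PySem.Dict.getD_foldl_modify_add_one]
  -- zeta-expand B (pure definitional unfolding of its lets)
  have hB : f_alt rainhas =
      (PySem.List.pyRange 0 (rainhas.length : Int) 1).foldl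
        (fun cont i =>
          if (((PySem.List.pyRange 0 (rainhas.length : Int) 1).foldl
                (fun (t : PySem.Dict Int Int × PySem.Dict Int Int × PySem.Dict Int Int) i =>
                  (t.1.modify (PySem.List.pyGetD rainhas i 0) 0 (· + 1),
                   t.2.1.modify (i + PySem.List.pyGetD rainhas i 0) 0 (· + 1),
                   t.2.2.modify (i - PySem.List.pyGetD rainhas i 0) 0 (· + 1)))
                (PySem.Dict.empty, PySem.Dict.empty, PySem.Dict.empty)).1.getD
                  (PySem.List.pyGetD rainhas i 0) 0 == 1
              && (((PySem.List.pyRange 0 (rainhas.length : Int) 1).foldl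
                (fun (t : PySem.Dict Int Int × PySem.Dict Int Int × PySem.Dict Int Int) i =>
                  (t.1.modify (PySem.List.pyGetD rainhas i 0) 0 (· + 1),
                   t.2.1.modify (i + PySem.List.pyGetD rainhas i 0) 0 (· + 1),
                   t.2.2.modify (i - PySem.List.pyGetD rainhas i 0) 0 (· + 1)))
                (PySem.Dict.empty, PySem.Dict.empty, PySem.Dict.empty)).2.1.getD
                  (i + PySem.List.pyGetD rainhas i 0) 0 == 1
              && ((PySem.List.pyRange 0 (rainhas.length : Int) 1).foldl
                (fun (t : PySem.Dict Int Int × PySem.Dict Int Int × PySem.Dict Int Int) i =>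
                  (t.1.modify (PySem.List.pyGetD rainhas i 0) 0 (· + 1),
                   t.2.1.modify (i + PySem.List.pyGetD rainhas i 0) 0 (· + 1),
                   t.2.2.modify (i - PySem.List.pyGetD rainhas i 0) 0 (· + 1)))
                (PySem.Dict.empty, PySem.Dict.empty, PySem.Dict.empty)).2.2.getD
                  (i - PySem.List.pyGetD rainhas i 0) 0 == 1))
          then cont + 1 else cont) 0 := rfl
  rw [htabs] at hB
  simp only [] at hB
  rw [PySem.List.foldl_if_add_one] at hB
  have hA : f rainhas = 0 + (((PySem.List.pyRange 0 (rainhas.length : Int) 1).countP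
      (fun i => !fInner i rainhas (PySem.List.pyRange 0 (rainhas.length : Int) 1)) : Nat) : Int) := by
    unfold f
    rw [PySem.List.foldl_if_add_one]
  rw [hA, hB]
  congr 1
  norm_cast
  apply List.countP_congr
  intro i hi
  simp only [hget, Bool.not_eq_true', Bool.and_eq_true, beq_iff_eq, decide_eq_decide]
  rw [Bool.eq_false_iff, Ne, fInner_eq_true_iff]
  push_neg
  have hameaca : ∀ j, ameacaF i j rainhas = true ↔
      (PySem.List.pyGetD rainhas i 0 = PySem.List.pyGetD rainhas j 0
        ∨ i + PySem.List.pyGetD rainhas i 0 = j + PySem.List.pyGetD rainhas j 0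
        ∨ i - PySem.List.pyGetD rainhas i 0 = j - PySem.List.pyGetD rainhas j 0) := by
    intro j
    simp only [ameacaF]
    split_ifs with h1 h2 h3 <;> simp_all
  have hkey : ∀ key : Int → Int,
      (((((PySem.List.pyRange 0 (rainhas.length : Int) 1).map key).count (key i) : Nat) : Int) = 1
        ↔ ∀ j ∈ PySem.List.pyRange 0 (rainhas.length : Int) 1, j ≠ i → key j ≠ key i) := by
    intro key
    rw [show (((((PySem.List.pyRange 0 (rainhas.length : Int) 1).map key).count (key i) : Nat) : Int) = 1)
        ↔ ((PySem.List.pyRange 0 (rainhas.length : Int) 1).map key).count (key i) = 1 by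
      constructor <;> intro h <;> omega]
    exact count_map_eq_one_iff key _ hnd i hi
  constructor
  · intro hno
    refine ⟨(hkey (fun j => PySem.List.pyGetD rainhas j 0)).mpr ?_,
        (hkey (fun j => j + PySem.List.pyGetD rainhas j 0)).mpr ?_,
        (hkey (fun j => j - PySem.List.pyGetD rainhas j 0)).mpr ?_⟩ <;>
      · intro j hj hne heq
        have hth := hno j hj hne
        simp only [ne_eq, hameaca] at hth
        push_neg at hth
        first
          | exact hth.1 heq.symm
          | exact hth.2.1 heq.symm
          | exact hth.2.2 heq.symm
  · rintro ⟨h1, h2, h3⟩ j hj hne hth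
    rw [hameaca] at hth
    rcases hth with he | he | he
    · exact (hkey (fun j => PySem.List.pyGetD rainhas j 0)).mp h1 j hj hne he.symm
    · exact (hkey (fun j => j + PySem.List.pyGetD rainhas j 0)).mp h2 j hj hne he.symm
    · exact (hkey (fun j => j - PySem.List.pyGetD rainhas j 0)).mp h3 j hj hne he.symm
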